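-- pv_equiv track=rewrite | github.com/lkrsnik/decypher_text | decypher.py | create_find_word
-- ===== SOURCE A (Python) =====
-- def create_find_word(w, dictionary):
--     f_w = ''
--     duplicate_letters = []
--     for l in w:
--         if l in dictionary:
--             f_w += dictionary[l]
--         else:
--             if w.count(l) > 1:
--                 duplicate_letters = [pos for pos, char in enumerate(w) if char == l]
--             f_w += '_'
--     forbidden_letters = [v for v in dictionary.values()]
--     return f_w, duplicate_letters, forbidden_letters
-- ===== SOURCE B (Python) =====
-- def create_find_word(w, dictionary):
--     counts = {}
--     for ch in w:
--         counts[ch] = counts.get(ch, 0) + 1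
--     f_w = ''.join(dictionary.get(ch, '_') for ch in w)
--     dup = next((ch for ch in reversed(w)
--                 if ch not in dictionary and counts[ch] > 1), None)
--     duplicate_letters = [] if dup is None else [pos for pos, ch in enumerate(w) if ch == dup]
--     return f_w, duplicate_letters, list(dictionary.values())
-- ===== Notes on version B (the rewrite author's own statement) =====
-- stated objective: faster
-- what changed: B builds a character-count dict in one pass and computes the duplicate-position list once (for the last unmasked duplicate letter, found by scanning from the right), instead of A's per-character w.count and enumerate rescans inside the loop.
import Mathlib
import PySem

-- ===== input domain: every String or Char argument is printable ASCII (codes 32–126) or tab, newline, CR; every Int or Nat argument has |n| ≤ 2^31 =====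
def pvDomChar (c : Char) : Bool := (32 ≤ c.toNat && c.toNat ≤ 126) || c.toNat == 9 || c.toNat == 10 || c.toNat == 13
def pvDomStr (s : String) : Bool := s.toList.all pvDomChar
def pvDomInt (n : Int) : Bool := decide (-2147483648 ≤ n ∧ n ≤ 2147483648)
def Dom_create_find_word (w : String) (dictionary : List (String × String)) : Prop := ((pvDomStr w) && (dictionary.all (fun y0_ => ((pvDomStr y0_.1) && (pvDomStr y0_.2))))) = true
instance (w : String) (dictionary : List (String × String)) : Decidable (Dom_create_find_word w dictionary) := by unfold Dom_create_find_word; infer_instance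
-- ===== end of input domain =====

-- B replaces A's per-character w.count/enumerate rescans by a one-pass count dict plus a single
-- right-to-left search for the last unmasked duplicate letter (objective: faster, O(n) vs O(n^2)).

-- shared trivial helpers: the one-char string used as dict key, and the positions of a char in w
def pvKey (l : Char) : String := String.ofList [l]
def pvPos (w : List Char) (c : Char) : List Int :=
  ((PySem.List.enumerate w 0).filter (fun p => p.2 == c)).map (·.1)

-- ===== PORT A =====
def create_find_word (w : String) (dictionary : List (String × String)) : String × List Int × List String :=
  let d := PySem.Dict.ofList dictionary
  let st := w.toList.foldl (fun (acc : List Char × List Int) l =>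
      if d.contains (pvKey l) then
        (acc.1 ++ ((d.get? (pvKey l)).getD "").toList, acc.2)   -- dictionary[l]; guarded by the contains test
      else
        (acc.1 ++ ['_'],
         if PySem.Str.count w (pvKey l) > 1 then pvPos w.toList l else acc.2))
    ([], [])
  (String.ofList st.1, st.2, d.values)

-- ===== PORT B =====
def create_find_word_alt (w : String) (dictionary : List (String × String)) : String × List Int × List String :=
  let d := PySem.Dict.ofList dictionary
  let counts := w.toList.foldl (fun cd ch => cd.insert ch (cd.getD ch 0 + 1)) (PySem.Dict.empty : PySem.Dict Char Int)
  let f_w := String.ofList (w.toList.flatMap (fun ch => (d.getD (pvKey ch) "_").toList))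
  let dup? := w.toList.reverse.find? (fun ch => !(d.contains (pvKey ch)) && decide (counts.getD ch 0 > 1))
  let duplicate_letters := match dup? with
    | none => ([] : List Int)
    | some c => pvPos w.toList c
  (f_w, duplicate_letters, d.values)

-- ===== PRECONDITION & SPEC =====
def Spec_create_find_word (w : String) (dictionary : List (String × String)) (out : String × List Int × List String) : Prop := out = create_find_word_alt w dictionary
instance (w : String) (dictionary : List (String × String)) (out : String × List Int × List String) : Decidable (Spec_create_find_word w dictionary out) := by unfold Spec_create_find_word; infer_instance

-- ===== CLAIM (what is proved, stated in full; the proofs are below) =====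
def Claim_equal_create_find_word : Prop := ∀ (w : String) (dictionary : List (String × String)), Dom_create_find_word w dictionary → Spec_create_find_word w dictionary (create_find_word w dictionary)

-- ===== LEMMAS AND PROOFS =====

-- counting a single-character substring is counting that character
lemma count_go_singleton (c : Char) : ∀ (l : List Char) (fuel acc : Nat), l.length ≤ fuel →
    PySem.Chars.count.go [c] fuel l acc = acc + l.count c := by
  intro l
  induction l with
  | nil => intro fuel acc _; cases fuel <;> simp [PySem.Chars.count.go]
  | cons h t ih =>
    intro fuel acc hle
    cases fuel with
    | zero => simp at hle
    | succ n =>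
      simp only [PySem.Chars.count.go, List.isPrefixOf, List.count_cons]
      by_cases hc : c = h
      · subst hc
        simp only [BEq.refl, Bool.true_and, if_pos]
        rw [show List.drop [c].length (c :: t) = t from rfl]
        rw [ih n (acc + 1) (by simpa using hle)]
        omega
      · have hb : (c == h) = false := by simp [hc]
        simp only [hb, Bool.false_and, if_neg Bool.false_ne_true]
        rw [ih n acc (by simpa using hle)]
        simp [Ne.symm hc]

lemma str_count_singleton (w : String) (c : Char) :
    PySem.Str.count w (pvKey c) = w.toList.count c := by
  rw [PySem.Str.count, pvKey, String.toList_ofList]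
  rw [show PySem.Chars.count w.toList [c]
        = PySem.Chars.count.go [c] w.toList.length w.toList 0 from rfl]
  rw [count_go_singleton c w.toList w.toList.length 0 le_rfl]
  simp

-- the counting loop of B computes the multiplicity of every character
lemma counts_getD (xs : List Char) : ∀ (cd : PySem.Dict Char Int) (c : Char),
    (xs.foldl (fun cd ch => cd.insert ch (cd.getD ch 0 + 1)) cd).getD c 0
      = cd.getD c 0 + xs.count c := by
  induction xs with
  | nil => intro cd c; simp
  | cons h t ih =>
    intro cd c
    rw [List.foldl_cons, ih, PySem.Dict.getD_insert, List.count_cons]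
    by_cases hc : c = h
    · subst hc; simp; ring
    · have hb : (h == c) = false := by simp [Ne.symm hc]
      simp [hc, hb]

lemma getD_empty_char (c : Char) : (PySem.Dict.empty : PySem.Dict Char Int).getD c 0 = 0 := by
  simp [PySem.Dict.getD, PySem.Dict.empty, PySem.Dict.get?]

-- A's combined loop, on any accumulator, equals B's three separate passes
lemma A_loop (w : String) (d : PySem.Dict String String) :
    ∀ (xs : List Char) (a : List Char) (b : List Int),
      xs.foldl (fun (acc : List Char × List Int) l =>
          if d.contains (pvKey l) then
            (acc.1 ++ ((d.get? (pvKey l)).getD "").toList, acc.2)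
          else
            (acc.1 ++ ['_'],
             if PySem.Str.count w (pvKey l) > 1 then pvPos w.toList l else acc.2)) (a, b)
      = (a ++ xs.flatMap (fun ch => (d.getD (pvKey ch) "_").toList),
         match xs.reverse.find? (fun ch => !(d.contains (pvKey ch)) &&
             decide ((w.toList.foldl (fun cd ch => cd.insert ch (cd.getD ch 0 + 1))
                 (PySem.Dict.empty : PySem.Dict Char Int)).getD ch 0 > 1)) with
         | none => b
         | some c => pvPos w.toList c) := by
  intro xs
  induction xs with
  | nil => intro a b; simp
  | cons x t ih =>
    intro a b
    rw [List.foldl_cons]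
    have hcnts : ∀ ch : Char,
        (w.toList.foldl (fun cd ch => cd.insert ch (cd.getD ch 0 + 1))
            (PySem.Dict.empty : PySem.Dict Char Int)).getD ch 0 = (w.toList.count ch : Int) := by
      intro ch; rw [counts_getD, getD_empty_char]; simp
    by_cases hc : d.contains (pvKey x) = true
    · have hjo : ((d.get? (pvKey x)).getD "").toList = (d.getD (pvKey x) "_").toList := by
        have hs := hc
        rw [PySem.Dict.contains_eq_isSome_get?] at hs
        obtain ⟨v, hv⟩ := Option.isSome_iff_exists.mp hs
        simp [PySem.Dict.getD, hv]
      have hp : (!(d.contains (pvKey x)) &&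
          decide ((w.toList.foldl (fun cd ch => cd.insert ch (cd.getD ch 0 + 1))
              (PySem.Dict.empty : PySem.Dict Char Int)).getD x 0 > 1)) = false := by
        simp [hc]
      rw [if_pos hc, ih, List.reverse_cons, List.find?_append]
      cases hf : t.reverse.find? (fun ch => !(d.contains (pvKey ch)) &&
          decide ((w.toList.foldl (fun cd ch => cd.insert ch (cd.getD ch 0 + 1))
              (PySem.Dict.empty : PySem.Dict Char Int)).getD ch 0 > 1)) with
      | some c => simp [hjo]
      | none => simp [hp, hjo]
    · have hcnt : PySem.Str.count w (pvKey x) = w.toList.count x := str_count_singleton w x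
      rw [if_neg hc]
      by_cases h2 : w.toList.count x > 1
      · have hp : (!(d.contains (pvKey x)) &&
            decide ((w.toList.foldl (fun cd ch => cd.insert ch (cd.getD ch 0 + 1))
                (PySem.Dict.empty : PySem.Dict Char Int)).getD x 0 > 1)) = true := by
          rw [hcnts x]; simp [hc]; exact_mod_cast h2
        have hjo : (d.getD (pvKey x) "_").toList = ['_'] := by
          have hs : d.get? (pvKey x) = none := by
            rw [PySem.Dict.contains_eq_isSome_get?] at hc
            simpa using hc
          simp [PySem.Dict.getD, hs]
        rw [if_pos (by rw [hcnt]; exact h2), ih, List.reverse_cons, List.find?_append]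
        cases hf : t.reverse.find? (fun ch => !(d.contains (pvKey ch)) &&
            decide ((w.toList.foldl (fun cd ch => cd.insert ch (cd.getD ch 0 + 1))
                (PySem.Dict.empty : PySem.Dict Char Int)).getD ch 0 > 1)) with
        | some c => simp [hjo]
        | none => simp [hp, hjo]
      · have hp : (!(d.contains (pvKey x)) &&
            decide ((w.toList.foldl (fun cd ch => cd.insert ch (cd.getD ch 0 + 1))
                (PySem.Dict.empty : PySem.Dict Char Int)).getD x 0 > 1)) = false := by
          rw [hcnts x]; simp; intro _; omega
        have hjo : (d.getD (pvKey x) "_").toList = ['_'] := by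
          have hs : d.get? (pvKey x) = none := by
            rw [PySem.Dict.contains_eq_isSome_get?] at hc
            simpa using hc
          simp [PySem.Dict.getD, hs]
        rw [if_neg (by rw [hcnt]; exact h2), ih, List.reverse_cons, List.find?_append]
        cases hf : t.reverse.find? (fun ch => !(d.contains (pvKey ch)) &&
            decide ((w.toList.foldl (fun cd ch => cd.insert ch (cd.getD ch 0 + 1))
                (PySem.Dict.empty : PySem.Dict Char Int)).getD ch 0 > 1)) with
        | some c => simp [hjo]
        | none => simp [hp, hjo]

-- ===== VERDICT (by name: the statement is the Claim_ definition above) =====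
theorem create_find_word_spec : Claim_equal_create_find_word := by
  intro w dictionary _
  unfold Spec_create_find_word
  simp only [create_find_word, create_find_word_alt]
  rw [A_loop w (PySem.Dict.ofList dictionary) w.toList [] []]
  simp
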